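-- pv_equiv track=rewrite | github.com/Sheko1/SoftUni | Python-Advanced/Practice-Exams/Exam-24.10.2020/03_list_pureness.py | best_list_pureness
-- ===== SOURCE A (Python) =====
-- def best_list_pureness(numbers, k, str_to_return="", rotation=0, best_sum=0):
--     if k < rotation:
--         return str_to_return
--
--     curr_sum = 0
--     for i in range(len(numbers)):
--         curr_sum += numbers[i] * i
--
--     rotated_numbers = [numbers[-1]]
--     for num in numbers[:-1]:
--         rotated_numbers.append(num)
--
--     if curr_sum > best_sum:
--         str_to_return = f"Best pureness {curr_sum} after {rotation} rotations"
--         best_sum = curr_sum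
--
--     return best_list_pureness(rotated_numbers, k, str_to_return, rotation + 1, best_sum)
-- ===== SOURCE B (Python) =====
-- def best_list_pureness(numbers, k, str_to_return="", rotation=0, best_sum=0):
--     if k < rotation:
--         return str_to_return
--     n = len(numbers)
--     total = sum(numbers)
--     curr = sum(i * x for i, x in enumerate(numbers))
--     for r in range(rotation, k + 1):
--         if curr > best_sum:
--             str_to_return = f"Best pureness {curr} after {r} rotations"
--             best_sum = curr
--         curr += total - n * numbers[(n - 1 - (r - rotation)) % n]
--     return str_to_return
-- ===== Notes on version B (the rewrite author's own statement) =====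
-- stated objective: alternative
-- what changed: Replaces A's recursion, which rebuilds the rotated list and recomputes the weighted-index sum from scratch for every rotation, by a single non-recursive loop that updates the sum incrementally via F(r+1) = F(r) + total - n*moved_element, reading the moved element from the original list with a modular index.
import Mathlib
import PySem

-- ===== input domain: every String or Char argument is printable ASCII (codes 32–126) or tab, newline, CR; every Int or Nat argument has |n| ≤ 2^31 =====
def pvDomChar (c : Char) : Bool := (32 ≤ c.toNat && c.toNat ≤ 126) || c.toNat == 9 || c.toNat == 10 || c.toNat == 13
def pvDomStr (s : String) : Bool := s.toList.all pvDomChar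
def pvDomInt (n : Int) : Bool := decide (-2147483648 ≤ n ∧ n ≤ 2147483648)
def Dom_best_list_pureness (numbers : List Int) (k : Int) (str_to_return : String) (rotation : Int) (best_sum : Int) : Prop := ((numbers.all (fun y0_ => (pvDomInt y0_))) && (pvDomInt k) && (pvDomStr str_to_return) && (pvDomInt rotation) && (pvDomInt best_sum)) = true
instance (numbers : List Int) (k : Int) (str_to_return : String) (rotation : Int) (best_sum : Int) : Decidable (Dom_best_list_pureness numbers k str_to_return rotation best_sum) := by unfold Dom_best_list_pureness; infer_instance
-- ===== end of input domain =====

-- B replaces A's recursion, which rebuilds the rotated list and recomputes the weighted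
-- sum for every rotation, by a single loop with the incremental update
-- F(r+1) = F(r) + total - n*moved_element, reading the moved element from the original
-- list with a modular index.

-- ===== PORT A =====
def best_list_pureness (numbers : List Int) (k : Int) (str_to_return : String) (rotation : Int) (best_sum : Int) : String :=
  if _h : k < rotation then str_to_return
  else
    -- curr_sum = 0; for i in range(len(numbers)): curr_sum += numbers[i] * i
    let curr_sum : Int :=
      (PySem.List.pyRange 0 (numbers.length : Int) 1).foldl
        (fun acc i => acc + PySem.List.pyGetD numbers i 0 * i) 0
    -- rotated_numbers = [numbers[-1]]; for num in numbers[:-1]: rotated_numbers.append(num)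
    -- (index always in range on Pre_: numbers ≠ [] here, so getD's default is never used)
    let rotated_numbers : List Int :=
      (PySem.List.slice numbers none (some (-1))).foldl
        (fun acc num => acc ++ [num]) [PySem.List.pyGetD numbers (-1) 0]
    let str2 := if curr_sum > best_sum then
        "Best pureness " ++ PySem.Int.toStr curr_sum ++ " after " ++ PySem.Int.toStr rotation ++ " rotations"
      else str_to_return
    let best2 := if curr_sum > best_sum then curr_sum else best_sum
    best_list_pureness rotated_numbers k str2 (rotation + 1) best2
termination_by (k + 1 - rotation).toNat
decreasing_by simp_wf; omega

-- ===== PORT B =====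
-- loop body of Source B: state (str_to_return, best_sum, curr), loop variable r
def pureStep (numbers : List Int) (total n rotation : Int)
    (st : String × Int × Int) (r : Int) : String × Int × Int :=
  ((if st.2.2 > st.2.1 then
      "Best pureness " ++ PySem.Int.toStr st.2.2 ++ " after " ++ PySem.Int.toStr r ++ " rotations"
    else st.1),
   (if st.2.2 > st.2.1 then st.2.2 else st.2.1),
   st.2.2 + (total - n * PySem.List.pyGetD numbers (PySem.Int.mod (n - 1 - (r - rotation)) n) 0))

def best_list_pureness_alt (numbers : List Int) (k : Int) (str_to_return : String) (rotation : Int) (best_sum : Int) : String :=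
  if k < rotation then str_to_return
  else
    let n : Int := (numbers.length : Int)
    let total : Int := numbers.foldl (· + ·) 0
    let curr : Int := (PySem.List.enumerate numbers 0).foldl (fun acc p => acc + p.1 * p.2) 0
    ((PySem.List.pyRange rotation (k + 1) 1).foldl (pureStep numbers total n rotation)
      (str_to_return, best_sum, curr)).1

-- ===== PRECONDITION & SPEC =====
-- Pre_ excludes the inputs on which A raises: numbers == [] with k >= rotation (A's
-- numbers[-1] is an IndexError; B raises there too, a ZeroDivisionError), and recursion
-- depths k - rotation beyond CPython's default recursion limit, where A raises
-- RecursionError (the bound 900 is conservative, so it also excludes a thin band of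
-- returning inputs just under the limit; see the cite).
def Pre_best_list_pureness (numbers : List Int) (k : Int) (str_to_return : String) (rotation : Int) (best_sum : Int) : Prop :=
  (k < rotation ∨ numbers ≠ []) ∧ k - rotation ≤ 900
instance (numbers : List Int) (k : Int) (str_to_return : String) (rotation : Int) (best_sum : Int) : Decidable (Pre_best_list_pureness numbers k str_to_return rotation best_sum) := by unfold Pre_best_list_pureness; infer_instance

def pvWitness_best_list_pureness : List Int × Int × String × Int × Int := ([3, -1, 5], 4, "", 0, 0)

def Spec_best_list_pureness (numbers : List Int) (k : Int) (str_to_return : String) (rotation : Int) (best_sum : Int) (out : String) : Prop := out = best_list_pureness_alt numbers k str_to_return rotation best_sum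
instance (numbers : List Int) (k : Int) (str_to_return : String) (rotation : Int) (best_sum : Int) (out : String) : Decidable (Spec_best_list_pureness numbers k str_to_return rotation best_sum out) := by unfold Spec_best_list_pureness; infer_instance

-- ===== CLAIM (what is proved, stated in full; the proofs are below) =====
def Claim_equal_best_list_pureness : Prop := ∀ (numbers : List Int) (k : Int) (str_to_return : String) (rotation : Int) (best_sum : Int), Dom_best_list_pureness numbers k str_to_return rotation best_sum → Pre_best_list_pureness numbers k str_to_return rotation best_sum → Spec_best_list_pureness numbers k str_to_return rotation best_sum (best_list_pureness numbers k str_to_return rotation best_sum)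

-- ===== LEMMAS AND PROOFS =====

-- weighted sum Σ (s+i)·l[i], the value both programs track
def msum (l : List Int) (s : Int) : Int := ((PySem.List.enumerate l s).map (fun p => p.1 * p.2)).sum

theorem msum_nil (s : Int) : msum [] s = 0 := by
  simp [msum, PySem.List.enumerate_nil]

theorem msum_cons (x : Int) (l : List Int) (s : Int) :
    msum (x :: l) s = s * x + msum l (s + 1) := by
  simp [msum, PySem.List.enumerate_cons]

theorem msum_shift (l : List Int) : ∀ s : Int, msum l s = msum l 0 + s * l.sum := by
  induction l with
  | nil => intro s; simp [msum_nil]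
  | cons x l ih =>
    intro s
    rw [msum_cons, msum_cons, ih (s + 1), ih (0 + 1), List.sum_cons]
    ring

theorem msum_append_singleton (l : List Int) (a : Int) :
    msum (l ++ [a]) 0 = msum l 0 + (l.length : Int) * a := by
  simp [msum, PySem.List.enumerate_append, PySem.List.enumerate_cons, PySem.List.enumerate_nil]

-- incremental update: rotating right changes the weighted sum by  total - n·(moved last element)
theorem msum_rotate (l : List Int) (h : l ≠ []) :
    msum (l.getLast h :: l.dropLast) 0 = msum l 0 + l.sum - (l.length : Int) * l.getLast h := by
  have hlen : 1 ≤ l.length := List.length_pos_iff.mpr h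
  have h1 : msum l 0 = msum l.dropLast 0 + (l.dropLast.length : Int) * l.getLast h := by
    conv_lhs => rw [← List.dropLast_concat_getLast h]
    exact msum_append_singleton _ _
  have h2 : l.sum = l.dropLast.sum + l.getLast h := by
    conv_lhs => rw [← List.dropLast_concat_getLast h]
    simp
  have h3 : (l.length : Int) = (l.dropLast.length : Int) + 1 := by
    simp [List.length_dropLast]; omega
  rw [msum_cons, msum_shift l.dropLast (0 + 1), h1, h2, h3]
  ring

-- B's enumerate loop computes msum
theorem currB_eq (l : List Int) :
    (PySem.List.enumerate l 0).foldl (fun acc p => acc + p.1 * p.2) 0 = msum l 0 := by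
  rw [PySem.List.foldl_add (g := fun p : Int × Int => p.1 * p.2)]
  simp [msum]

-- A's index loop computes the same weighted sum
theorem currA_eq (l : List Int) :
    (PySem.List.pyRange 0 (l.length : Int) 1).foldl
      (fun acc i => acc + PySem.List.pyGetD l i 0 * i) 0 = msum l 0 := by
  rw [← currB_eq, PySem.List.enumerate_eq_map_pyRange (d := 0), List.foldl_map]
  apply PySem.List.foldl_congr_mem
  intro acc x _
  ring

theorem sum_foldl (l : List Int) : l.foldl (· + ·) 0 = l.sum := by
  rw [show (· + · : Int → Int → Int) = (fun acc x => acc + id x) from rfl,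
    PySem.List.foldl_add (g := (id : Int → Int))]
  simp

-- A's rotated list is last :: dropLast
theorem rotatedA_eq (l : List Int) (h : l ≠ []) :
    (PySem.List.slice l none (some (-1))).foldl
      (fun acc num => acc ++ [num]) [PySem.List.pyGetD l (-1) 0] = l.getLast h :: l.dropLast := by
  rw [PySem.List.foldl_append_singleton_eq_self, PySem.List.slice_to_neg_one,
    PySem.List.pyGetD_neg_one (h := h)]
  rfl

theorem emod_pred (x n : Int) : ((x + 1) % n - 1) % n = x % n := by
  conv_rhs => rw [show x = (x + 1) - 1 by ring, Int.sub_emod]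
  rw [Int.sub_emod ((x + 1) % n) 1 n, Int.emod_emod_of_dvd _ dvd_rfl]

-- indexing the rotated list (mod n) = indexing the original list one step further back
theorem pyGetD_last (l : List Int) (h : l ≠ []) :
    PySem.List.pyGetD l ((l.length : Int) - 1) 0 = l.getLast h := by
  have hn : 0 < l.length := List.length_pos_iff.mpr h
  rw [PySem.List.pyGetD_eq_getElem l 0 (by omega) (by omega), List.getLast_eq_getElem]
  have ht : ((l.length : Int) - 1).toNat = l.length - 1 := by omega
  simp [ht]

theorem pyGetD_rotate (l : List Int) (h : l ≠ []) (j : Int) (h0 : 0 ≤ j)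
    (h1 : j < (l.length : Int)) :
    PySem.List.pyGetD (l.getLast h :: l.dropLast) j 0 =
      PySem.List.pyGetD l ((j - 1) % (l.length : Int)) 0 := by
  have hn : 0 < l.length := List.length_pos_iff.mpr h
  obtain ⟨m, rfl⟩ : ∃ m : Nat, j = (m : Int) := ⟨j.toNat, by omega⟩
  have hm : m < l.length := by exact_mod_cast h1
  cases m with
  | zero =>
    simp only [Nat.cast_zero]
    rw [show ((0 : Int) - 1) = ((l.length : Int) - 1) + (l.length : Int) * (-1) by ring,
      Int.add_mul_emod_self_left, Int.emod_eq_of_lt (by omega) (by omega),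
      PySem.List.pyGetD_zero_cons, pyGetD_last l h]
  | succ i =>
    have h1' : (((i + 1 : Nat)) : Int) - 1 = (i : Int) := by push_cast; ring
    rw [h1', Int.emod_eq_of_lt (by omega) (by omega),
      PySem.List.pyGetD_natCast, PySem.List.pyGetD_natCast, List.getD_cons_succ]
    have hi : i < l.dropLast.length := by rw [List.length_dropLast]; omega
    rw [List.getD_eq_getElem _ _ hi, List.getD_eq_getElem _ _ (by omega)]
    exact List.getElem_dropLast hi

theorem step_rotate (l : List Int) (h : l ≠ []) (total rot : Int) (st : String × Int × Int) (r : Int) :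
    pureStep (l.getLast h :: l.dropLast) total (l.length : Int) (rot + 1) st r =
      pureStep l total (l.length : Int) rot st r := by
  have hn : 0 < l.length := List.length_pos_iff.mpr h
  have hnI : (0 : Int) < (l.length : Int) := by exact_mod_cast hn
  have hj0 : 0 ≤ ((l.length : Int) - 1 - (r - (rot + 1))) % (l.length : Int) :=
    Int.emod_nonneg _ (by omega)
  have hj1 : ((l.length : Int) - 1 - (r - (rot + 1))) % (l.length : Int) < (l.length : Int) :=
    Int.emod_lt_of_pos _ hnI
  have key : PySem.List.pyGetD (l.getLast h :: l.dropLast)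
      (((l.length : Int) - 1 - (r - (rot + 1))) % (l.length : Int)) 0 =
      PySem.List.pyGetD l (((l.length : Int) - 1 - (r - rot)) % (l.length : Int)) 0 := by
    rw [pyGetD_rotate l h _ hj0 hj1,
      show ((l.length : Int) - 1 - (r - (rot + 1)))
        = ((l.length : Int) - 1 - (r - rot)) + 1 by ring, emod_pred]
  unfold pureStep
  simp only [PySem.Int.mod_eq_emod_of_pos hnI, key]

theorem alt_loop (l : List Int) (k : Int) (s : String) (rot b : Int) :
    best_list_pureness_alt l k s rot b =
      ((PySem.List.pyRange rot (k + 1) 1).foldl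
        (pureStep l l.sum (l.length : Int) rot) (s, b, msum l 0)).1 := by
  unfold best_list_pureness_alt
  rw [currB_eq, sum_foldl]
  split
  · rw [PySem.List.pyRange_one_eq_nil (by omega)]
    rfl
  · rfl

theorem main_eq : ∀ (fuel : Nat) (l : List Int) (h : l ≠ []) (k : Int) (s : String) (rot b : Int),
    (k + 1 - rot).toNat ≤ fuel →
    best_list_pureness l k s rot b = best_list_pureness_alt l k s rot b := by
  intro fuel
  induction fuel with
  | zero =>
    intro l h k s rot b hf
    have hk : k < rot := by omega
    rw [best_list_pureness, best_list_pureness_alt]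
    simp [hk]
  | succ m ih =>
    intro l h k s rot b hf
    by_cases hk : k < rot
    · rw [best_list_pureness, best_list_pureness_alt]
      simp [hk]
    · have hn : 0 < l.length := List.length_pos_iff.mpr h
      have hnI : (0 : Int) < (l.length : Int) := by exact_mod_cast hn
      rw [best_list_pureness]
      simp only [dif_neg hk, currA_eq, rotatedA_eq l h]
      rw [ih _ (by simp) k _ (rot + 1) _ (by omega)]
      rw [alt_loop, alt_loop]
      have hsum : (l.getLast h :: l.dropLast).sum = l.sum := by
        conv_rhs => rw [← List.dropLast_concat_getLast h]
        simp [add_comm]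
      have hlenN : (l.getLast h :: l.dropLast).length = l.length := by
        rw [List.length_cons, List.length_dropLast]
        omega
      have hlen : ((l.getLast h :: l.dropLast).length : Int) = (l.length : Int) := by
        exact_mod_cast congrArg Nat.cast hlenN
      have hfun : pureStep (l.getLast h :: l.dropLast) l.sum (l.length : Int) (rot + 1)
          = pureStep l l.sum (l.length : Int) rot :=
        funext fun st => funext fun r => step_rotate l h l.sum rot st r
      rw [hsum, hlen, hfun, msum_rotate l h,
        show PySem.List.pyRange rot (k + 1) 1 = rot :: PySem.List.pyRange (rot + 1) (k + 1) 1
          from PySem.List.pyRange_one_cons (by omega),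
        List.foldl_cons]
      have hmod : PySem.Int.mod ((l.length : Int) - 1 - (rot - rot)) (l.length : Int)
          = (l.length : Int) - 1 := by
        rw [PySem.Int.mod_eq_emod_of_pos hnI]
        rw [show ((l.length : Int) - 1 - (rot - rot)) = (l.length : Int) - 1 by ring]
        exact Int.emod_eq_of_lt (by omega) (by omega)
      have hinit : pureStep l l.sum (l.length : Int) rot (s, b, msum l 0) rot
          = ((if msum l 0 > b then
                "Best pureness " ++ PySem.Int.toStr (msum l 0) ++ " after " ++ PySem.Int.toStr rot ++ " rotations"
              else s),
             (if msum l 0 > b then msum l 0 else b),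
             msum l 0 + l.sum - (l.length : Int) * l.getLast h) := by
        unfold pureStep
        rw [hmod, pyGetD_last l h]
        refine Prod.ext rfl (Prod.ext rfl ?_)
        ring
      rw [hinit]

-- ===== VERDICT (by name: the statement is the Claim_ definition above) =====
theorem best_list_pureness_spec : Claim_equal_best_list_pureness := by
  intro numbers k s rot b _hdom hpre
  unfold Spec_best_list_pureness
  rcases hpre.1 with hk | hne
  · rw [best_list_pureness, best_list_pureness_alt]
    simp [hk]
  · exact main_eq (k + 1 - rot).toNat numbers hne k s rot b le_rfl
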